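-- pv_equiv track=rewrite | github.com/Rybchits/salient-object-detection | video_test.py | rolling_list
-- ===== SOURCE A (Python) =====
-- from typing import Any, List, Tuple
--
-- def rolling_list(source: List, rolling_window: int) -> List:
--     padding_size = rolling_window // 2
--     assert padding_size < len(source), "Указано слишком большое окно для сглаживания"
--     assert rolling_window % 2 == 1, "Окно для сглаживания должно быть нечетного размера"
--
--     # mirror
--     list_with_padding = [*reversed(source[:padding_size]), *source, *reversed(source[-padding_size:])]
--     result = []
--
--     for i in range(0, len(list_with_padding)-rolling_window+1):
--         result.append(sum(list_with_padding[i:i+rolling_window]) // rolling_window)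
--
--     return result
-- ===== SOURCE B (Python) =====
-- def rolling_list(source, rolling_window):
--     p = rolling_window // 2
--     assert p < len(source), "Указано слишком большое окно для сглаживания"
--     assert rolling_window % 2 == 1, "Окно для сглаживания должно быть нечетного размера"
--     # mirror padding
--     padded = list(reversed(source[:p])) + list(source) + list(reversed(source[-p:]))
--     s = sum(padded[:rolling_window])
--     out = [s // rolling_window]
--     for i in range(rolling_window, len(padded)):
--         s += padded[i] - padded[i - rolling_window]
--         out.append(s // rolling_window)
--     return out
-- ===== Notes on version B (the rewrite author's own statement) =====
-- stated objective: faster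
-- what changed: Replaces the per-position re-summation of each window slice (O(n*w)) with a single running window sum, updated per step by adding the entering element and subtracting the leaving one (O(n)).
-- outside the precondition, e.g. on rolling_list([1, 2, 3], -3): A returns [-1, -1, -2, 0, 0, 0, 0, 0, 0], B raises IndexError
import Mathlib
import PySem

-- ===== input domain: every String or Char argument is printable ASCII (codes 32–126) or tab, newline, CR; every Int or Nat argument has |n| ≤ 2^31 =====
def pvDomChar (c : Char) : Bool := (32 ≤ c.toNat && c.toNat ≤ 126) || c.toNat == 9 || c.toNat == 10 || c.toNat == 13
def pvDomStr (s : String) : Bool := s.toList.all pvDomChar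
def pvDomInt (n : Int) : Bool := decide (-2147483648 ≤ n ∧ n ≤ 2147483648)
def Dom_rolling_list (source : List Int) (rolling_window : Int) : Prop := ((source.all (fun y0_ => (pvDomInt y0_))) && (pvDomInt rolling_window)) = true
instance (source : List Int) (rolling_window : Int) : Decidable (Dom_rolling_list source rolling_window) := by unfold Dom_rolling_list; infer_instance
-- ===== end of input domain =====

-- B replaces A's per-position window re-summation (O(n*w)) by a single running window sum
-- updated incrementally per step (O(n)); same mirror padding, same return value on Pre_.


-- ===== PORT A =====
def rolling_list (source : List Int) (rolling_window : Int) : List Int :=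
  let padding_size := PySem.Int.floordiv rolling_window 2
  let list_with_padding :=
    (PySem.List.slice source none (some padding_size)).reverse ++ source ++
    (PySem.List.slice source (some (-padding_size)) none).reverse
  (PySem.List.pyRange 0 ((list_with_padding.length : Int) - rolling_window + 1) 1).foldl
    (fun result i =>
      result ++ [PySem.Int.floordiv
        (PySem.List.slice list_with_padding (some i) (some (i + rolling_window))).sum
        rolling_window])
    []

-- ===== PORT B =====
def rolling_list_alt (source : List Int) (rolling_window : Int) : List Int :=
  let p := PySem.Int.floordiv rolling_window 2
  let padded :=
    (PySem.List.slice source none (some p)).reverse ++ source ++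
    (PySem.List.slice source (some (-p)) none).reverse
  let s0 := (PySem.List.slice padded none (some rolling_window)).sum
  ((PySem.List.pyRange rolling_window (padded.length : Int) 1).foldl
    (fun (acc : Int × List Int) i =>
      let s := acc.1 + PySem.List.pyGetD padded i 0 - PySem.List.pyGetD padded (i - rolling_window) 0
      (s, acc.2 ++ [PySem.Int.floordiv s rolling_window]))
    (s0, [PySem.Int.floordiv s0 rolling_window])).2

-- ===== PRECONDITION & SPEC =====
-- Pre_ excludes non-positive windows (a smoothing window size is positive by nature; for odd
-- negative windows A returns accidental values built from empty negative-width slices, and B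
-- raises IndexError there) and the inputs where A's asserts raise (even window, window too large).
def Pre_rolling_list (source : List Int) (rolling_window : Int) : Prop :=
  1 ≤ rolling_window ∧ PySem.Int.mod rolling_window 2 = 1 ∧
  PySem.Int.floordiv rolling_window 2 < (source.length : Int)
instance (source : List Int) (rolling_window : Int) : Decidable (Pre_rolling_list source rolling_window) := by
  unfold Pre_rolling_list; infer_instance

def pvWitness_rolling_list : List Int × Int := ([1, 2, 3, 4], 3)

def Spec_rolling_list (source : List Int) (rolling_window : Int) (out : List Int) : Prop :=
  out = rolling_list_alt source rolling_window
instance (source : List Int) (rolling_window : Int) (out : List Int) : Decidable (Spec_rolling_list source rolling_window out) := by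
  unfold Spec_rolling_list; infer_instance

-- ===== CLAIM (what is proved, stated in full; the proofs are below) =====
def Claim_equal_rolling_list : Prop := ∀ (source : List Int) (rolling_window : Int), Dom_rolling_list source rolling_window → Pre_rolling_list source rolling_window → Spec_rolling_list source rolling_window (rolling_list source rolling_window)

-- ===== LEMMAS AND PROOFS =====

-- window sum: sum of the w elements of P starting at index k
def pvWin (P : List Int) (w k : Nat) : Int := ((P.drop k).take w).sum

theorem pvSum_take_succ (xs : List Int) (m : Nat) (h : m < xs.length) :
    (xs.take (m + 1)).sum = (xs.take m).sum + xs.getD m 0 := by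
  rw [List.take_add_one, List.sum_append]
  simp [List.getElem?_eq_getElem h, List.getD_eq_getElem?_getD]

theorem pvWin_succ (P : List Int) (w k : Nat) (h : k + w < P.length) :
    pvWin P w (k + 1) = pvWin P w k + P.getD (k + w) 0 - P.getD k 0 := by
  unfold pvWin
  cases w with
  | zero => simp
  | succ v =>
    have hd : P.drop k ≠ [] := by
      have : k < P.length := by omega
      simp [List.drop_eq_nil_iff]; omega
    obtain ⟨y, t, hyt⟩ := List.exists_cons_of_ne_nil hd
    have hdk1 : P.drop (k + 1) = t := by
      rw [← List.drop_drop]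
      simp [hyt]
    have hlen : v < t.length := by
      have := List.length_drop (l := P) (i := k)
      rw [hyt] at this
      simp at this; omega
    have hPk : P.getD k 0 = y := by
      have : (P.drop k).getD 0 0 = y := by simp [hyt]
      simpa [List.getD_eq_getElem?_getD, List.getElem?_drop] using this
    have hPkw : P.getD (k + (v + 1)) 0 = t.getD v 0 := by
      have : (P.drop (k + 1)).getD v 0 = t.getD v 0 := by rw [hdk1]
      simpa [List.getD_eq_getElem?_getD, List.getElem?_drop, Nat.add_assoc, Nat.add_comm 1 v] using this
    rw [hdk1, hyt, hPk, hPkw, List.take_succ_cons, List.sum_cons, pvSum_take_succ t v hlen]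
    ring

-- B's loop: running-sum invariant (state after d steps starting at window k)
theorem pvBloop (P : List Int) (w : Nat) :
    ∀ (d k : Nat) (out : List Int), k + w + d = P.length →
    ((PySem.List.pyRange ((w + k : Nat) : Int) ((P.length : Nat) : Int) 1).foldl
      (fun (acc : Int × List Int) i =>
        let s := acc.1 + PySem.List.pyGetD P i 0 - PySem.List.pyGetD P (i - (w : Int)) 0
        (s, acc.2 ++ [PySem.Int.floordiv s (w : Int)]))
      (pvWin P w k, out)).2
    = out ++ (List.range d).map (fun j => PySem.Int.floordiv (pvWin P w (k + 1 + j)) (w : Int)) := by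
  intro d
  induction d with
  | zero =>
    intro k out hk
    rw [PySem.List.pyRange_one_eq_nil (by exact_mod_cast Nat.le_of_eq (by omega))]
    simp
  | succ d ih =>
    intro k out hk
    rw [PySem.List.pyRange_one_cons (by exact_mod_cast (by omega : w + k < P.length))]
    rw [List.foldl_cons]
    have e1 : ((w + k : Nat) : Int) - (w : Int) = ((k : Nat) : Int) := by push_cast; ring
    simp only [e1, PySem.List.pyGetD_natCast]
    have e2 : pvWin P w k + P.getD (w + k) 0 - P.getD k 0 = pvWin P w (k + 1) := by
      rw [pvWin_succ P w k (by omega), Nat.add_comm k w]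
    have e3 : ((w + k : Nat) : Int) + 1 = ((w + (k + 1) : Nat) : Int) := by push_cast; ring
    rw [e2, e3, ih (k + 1) _ (by omega)]
    rw [List.range_succ_eq_map, List.map_cons, List.map_map]
    have e4 : ((fun j => PySem.Int.floordiv (pvWin P w (k + 1 + j)) (w : Int)) ∘ Nat.succ)
        = fun j => PySem.Int.floordiv (pvWin P w (k + 1 + 1 + j)) (w : Int) := by
      funext j
      simp only [Function.comp]
      congr 2
      omega
    rw [e4]
    simp [List.append_assoc]

-- main equivalence lemma, with the window size exposed as a natural number
theorem pvMain (source : List Int) (wn : Nat) (hodd : wn % 2 = 1)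
    (hpn : wn / 2 < source.length) :
    rolling_list source (wn : Int) = rolling_list_alt source (wn : Int) := by
  set n := source.length with hn
  set pn := wn / 2 with hpndef
  have hwn : wn = 2 * pn + 1 := by omega
  have hfd : PySem.Int.floordiv (wn : Int) 2 = (pn : Int) := by
    exact_mod_cast PySem.Int.floordiv_natCast wn 2
  simp only [rolling_list, rolling_list_alt, hfd, PySem.List.slice_to_natCast]
  set P := (source.take pn).reverse ++ source ++
    (PySem.List.slice source (some (-(pn : Int))) none).reverse with hP
  have hlen : wn ≤ P.length := by
    rcases Nat.eq_zero_or_pos pn with hp0 | hp1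
    · rw [hP, hp0]
      simp [PySem.List.slice_zero_start, PySem.List.slice_none_none]
      omega
    · rw [hP, PySem.List.slice_from_neg_natCast source pn hp1]
      simp
      omega
  -- A side: the result is the window sums mapped over the window start positions
  have hbA : (P.length : Int) - (wn : Int) + 1 = ((P.length - wn + 1 : Nat) : Int) := by
    omega
  rw [hbA, PySem.List.pyRange_zero_nat, PySem.List.foldl_append_singleton_eq_map, List.map_map,
    List.nil_append]
  have hfA : ((fun i => PySem.Int.floordiv (PySem.List.slice P (some i) (some (i + (wn : Int)))).sum (wn : Int)) ∘ (fun k : Nat => (k : Int)))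
      = fun k : Nat => PySem.Int.floordiv (pvWin P wn k) (wn : Int) := by
    funext k
    simp [Function.comp, PySem.List.slice_natCast_add, pvWin]
  rw [hfA]
  -- B side: the running-sum loop produces the same window sums
  have hs0 : (P.take wn).sum = pvWin P wn 0 := by simp [pvWin]
  rw [hs0]
  have hB := pvBloop P wn (P.length - wn) 0 [PySem.Int.floordiv (pvWin P wn 0) (wn : Int)] (by omega)
  simp only [Nat.add_zero] at hB
  rw [hB]
  have hone : P.length - wn + 1 = (P.length - wn) + 1 := rfl
  rw [hone, List.range_succ_eq_map, List.map_cons, List.map_map]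
  have hfs : ((fun k : Nat => PySem.Int.floordiv (pvWin P wn k) (wn : Int)) ∘ Nat.succ)
      = fun j : Nat => PySem.Int.floordiv (pvWin P wn (0 + 1 + j)) (wn : Int) := by
    funext j
    simp only [Function.comp]
    congr 2
    omega
  rw [hfs]
  simp

-- ===== VERDICT (by name: the statement is the Claim_ definition above) =====
theorem rolling_list_spec : Claim_equal_rolling_list := by
  intro source w _ hpre
  obtain ⟨h1, h2, h3⟩ := hpre
  obtain ⟨wn, hw⟩ := Int.eq_ofNat_of_zero_le (by omega : (0:Int) ≤ w)
  subst hw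
  have hm := PySem.Int.mod_natCast wn 2
  simp only [Nat.cast_ofNat] at hm
  rw [hm] at h2
  have hodd : wn % 2 = 1 := by exact_mod_cast h2
  have hf := PySem.Int.floordiv_natCast wn 2
  simp only [Nat.cast_ofNat] at hf
  rw [hf] at h3
  exact pvMain source wn hodd (by exact_mod_cast h3)
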